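-- pv_equiv track=rewrite | github.com/MartinTs168/Fundamentals_Python_Softuni | binary_oparations/binary_digit_count.py | solve
-- ===== SOURCE A (Python) =====
-- def solve(number, digit):
--     count = 0
--     while number > 0:
--         remainder = number % 2
--         number = number // 2
--         if remainder == digit:
--             count += 1
--     return count
-- ===== SOURCE B (Python) =====
-- def solve(number, digit):
--     if number <= 0:
--         return 0
--     ones = bin(number).count('1')
--     if digit == 1:
--         return ones
--     if digit == 0:
--         return number.bit_length() - ones
--     return 0
-- ===== Notes on version B (the rewrite author's own statement) =====
-- stated objective: simpler
-- what changed: Replaces the bit-by-bit while loop with a loop-free closed form: popcount (bin().count('1')) for digit==1, bit_length minus popcount for digit==0, and 0 otherwise or for number<=0.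
import Mathlib
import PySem

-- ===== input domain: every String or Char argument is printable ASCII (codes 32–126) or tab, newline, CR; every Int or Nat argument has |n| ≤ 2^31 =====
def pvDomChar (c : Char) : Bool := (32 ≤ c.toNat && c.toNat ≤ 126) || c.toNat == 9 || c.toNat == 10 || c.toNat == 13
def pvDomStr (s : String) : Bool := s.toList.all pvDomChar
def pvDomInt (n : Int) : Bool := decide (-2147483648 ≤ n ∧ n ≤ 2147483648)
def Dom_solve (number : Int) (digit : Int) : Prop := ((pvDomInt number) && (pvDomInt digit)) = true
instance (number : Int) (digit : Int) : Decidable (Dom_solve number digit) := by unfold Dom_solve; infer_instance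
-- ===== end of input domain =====

-- B replaces A's bit-by-bit while loop with a loop-free closed form: popcount for digit==1,
-- bit_length minus popcount for digit==0, else 0 (objective: simpler).


-- ===== PORT A =====
-- the while loop of A, carrying (number, count); digit is fixed
def solveLoop (number : Int) (digit : Int) (count : Int) : Int :=
  if h : number > 0 then
    let remainder := PySem.Int.mod number 2
    solveLoop (PySem.Int.floordiv number 2) digit
      (if remainder = digit then count + 1 else count)
  else count
termination_by number.toNat
decreasing_by
  have h2 : PySem.Int.floordiv number 2 = number / 2 :=
    PySem.Int.floordiv_eq_ediv_of_pos (by omega)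
  rw [h2]; omega

def solve (number : Int) (digit : Int) : Int := solveLoop number digit 0

-- ===== PORT B =====
def solve_alt (number : Int) (digit : Int) : Int :=
  if number ≤ 0 then 0
  else
    let ones : Int := (PySem.Int.bitCount number : Int)
    if digit = 1 then ones
    else if digit = 0 then (PySem.Int.bitLength number : Int) - ones
    else 0

-- ===== PRECONDITION & SPEC =====
def Spec_solve (number : Int) (digit : Int) (out : Int) : Prop := out = solve_alt number digit
instance (number : Int) (digit : Int) (out : Int) : Decidable (Spec_solve number digit out) := by unfold Spec_solve; infer_instance

-- ===== CLAIM (what is proved, stated in full; the proofs are below) =====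
def Claim_equal_solve : Prop := ∀ (number : Int) (digit : Int), Dom_solve number digit → Spec_solve number digit (solve number digit)

-- ===== LEMMAS AND PROOFS =====
theorem solveLoop_eq (number digit count : Int) :
    solveLoop number digit count = count + solve_alt number digit := by
  by_cases h : number > 0
  · have hfd : PySem.Int.floordiv number 2 = number / 2 :=
      PySem.Int.floordiv_eq_ediv_of_pos (by omega)
    have hdec : (number / 2).toNat < number.toNat := by omega
    have ih := solveLoop_eq (PySem.Int.floordiv number 2) digit
      (if PySem.Int.mod number 2 = digit then count + 1 else count)
    rw [solveLoop, dif_pos h, ih]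
    have hmod : PySem.Int.mod number 2 = number % 2 :=
      PySem.Int.mod_eq_emod_of_pos (by omega)
    have hbc := PySem.Int.bitCount_of_pos (n := number) (by omega)
    have hbl := PySem.Int.bitLength_of_pos (n := number) (by omega)
    have hr : number % 2 = 0 ∨ number % 2 = 1 := by omega
    -- analyse the half
    by_cases hh : number / 2 > 0
    · unfold solve_alt
      rw [hfd] at hbc hbl
      simp only [hmod, hfd]
      have h1 : ¬ number ≤ 0 := by omega
      have h2 : ¬ number / 2 ≤ 0 := by omega
      rw [if_neg h1, if_neg h2]
      rcases hr with hr | hr <;>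
        rcases eq_or_ne digit 1 with hd1 | hd1 <;>
          rcases eq_or_ne digit 0 with hd0 | hd0 <;>
            simp_all <;> omega
    · have hhalf : number / 2 = 0 := by omega
      unfold solve_alt
      rw [hfd, hhalf] at hbc hbl ⊢
      rw [PySem.Int.bitCount_zero] at hbc
      rw [PySem.Int.bitLength_zero] at hbl
      simp only [hmod]
      have h1 : ¬ number ≤ 0 := by omega
      rw [if_neg h1, if_pos (by omega : (0:Int) ≤ 0)]
      rcases hr with hr | hr <;>
        rcases eq_or_ne digit 1 with hd1 | hd1 <;>
          rcases eq_or_ne digit 0 with hd0 | hd0 <;>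
            simp_all <;> omega
  · rw [solveLoop, dif_neg h]
    unfold solve_alt
    rw [if_pos (by omega)]
    omega
termination_by number.toNat
decreasing_by
  have hfd : PySem.Int.floordiv number 2 = number / 2 :=
    PySem.Int.floordiv_eq_ediv_of_pos (by omega)
  rw [hfd]; omega

-- ===== VERDICT (by name: the statement is the Claim_ definition above) =====
theorem solve_spec : Claim_equal_solve := by
  intro number digit _
  unfold Spec_solve solve
  rw [solveLoop_eq]
  omega
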